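-- pv_equiv track=rewrite | github.com/amertalic/DTdb21 | utils.py | microchip_cleaner
-- ===== SOURCE A (Python) =====
-- def microchip_cleaner(mchip):
--     microchip = str(mchip)
--     for char in 'abcdefghijklmnopqrstuvwxyzqxšđžćč,.()/*; ':
--         if char in microchip.lower():
--             microchip = microchip.lower().replace(char, '')
--     # usually microchip starts with 0
--     while len(microchip) != 15:
--         if len(microchip) < 15:
--             microchip = str(0) + microchip
--         else:
--             # this means that the microchip is longer than 15 characters
--             # TODO get these examples(into a sheet written appended and saved) and figure out what to do with them
--             # long_microchips.append(microchip)
--             return microchip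
--     return str(microchip)
-- ===== SOURCE B (Python) =====
-- _REMOVE = set('abcdefghijklmnopqrstuvwxyzqxšđžćč,.()/*; ')
--
--
-- def microchip_cleaner(mchip):
--     cleaned = ''.join(c for c in str(mchip).lower() if c not in _REMOVE)
--     return cleaned.rjust(15, '0')
-- ===== Notes on version B (the rewrite author's own statement) =====
-- stated objective: simpler
-- what changed: Replaces the 43 repeated scan-and-replace passes over the whole string plus the one-character-at-a-time zero-prepending while-loop with a single filtering pass over the lowercased input followed by one rjust(15,'0') call.
import Mathlib
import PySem

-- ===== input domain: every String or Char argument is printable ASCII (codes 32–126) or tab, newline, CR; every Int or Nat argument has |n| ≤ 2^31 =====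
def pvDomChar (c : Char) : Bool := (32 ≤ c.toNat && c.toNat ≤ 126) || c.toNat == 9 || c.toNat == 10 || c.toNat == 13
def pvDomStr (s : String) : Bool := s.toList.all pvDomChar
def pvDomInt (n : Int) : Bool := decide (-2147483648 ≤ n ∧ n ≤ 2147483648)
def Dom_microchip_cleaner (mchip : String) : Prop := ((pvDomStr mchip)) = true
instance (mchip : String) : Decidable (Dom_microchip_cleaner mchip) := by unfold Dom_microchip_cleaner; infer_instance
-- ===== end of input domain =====

-- B replaces A's 43 repeated scan-and-replace passes and one-char-at-a-time zero-padding loop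
-- by a single filtering pass over the lowercased input plus one rjust(15,'0'); objective: simpler.

-- ===== PORT A =====
-- the literal removal-character string of A's for-loop
def pvRemove : List Char := "abcdefghijklmnopqrstuvwxyzqxšđžćč,.()/*; ".toList

-- the while-loop of A: prepend '0' until length is 15; return unchanged if already longer
def pvPadA (s : List Char) : List Char :=
  if s.length = 15 then s
  else if s.length < 15 then pvPadA ('0' :: s)
  else s
termination_by 15 - s.length
decreasing_by simp; omega

def microchip_cleaner (mchip : String) : String :=
  let m := pvRemove.foldl (fun m c =>
    if PySem.Chars.isIn [c] (PySem.Chars.lower m) then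
      PySem.Chars.replace (PySem.Chars.lower m) [c] []
    else m) mchip.toList
  String.ofList (pvPadA m)

-- ===== PORT B =====
-- Python set literal _REMOVE (a set of Chars)
def pvRemoveSet : PySem.Set Char := PySem.Set.ofList pvRemove

def microchip_cleaner_alt (mchip : String) : String :=
  let cleaned := (PySem.Chars.lower mchip.toList).filter
      (fun c => !(PySem.Set.contains pvRemoveSet c))
  -- cleaned.rjust(15, '0'): left-pad with '0' to width 15, unchanged if already ≥ 15
  if 15 ≤ cleaned.length then String.ofList cleaned
  else String.ofList (List.replicate (15 - cleaned.length) '0' ++ cleaned)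

-- ===== PRECONDITION & SPEC =====
def Spec_microchip_cleaner (mchip : String) (out : String) : Prop := out = microchip_cleaner_alt mchip
instance (mchip : String) (out : String) : Decidable (Spec_microchip_cleaner mchip out) := by unfold Spec_microchip_cleaner; infer_instance

-- ===== CLAIM (what is proved, stated in full; the proofs are below) =====
def Claim_equal_microchip_cleaner : Prop := ∀ (mchip : String), Dom_microchip_cleaner mchip → Spec_microchip_cleaner mchip (microchip_cleaner mchip)

-- ===== LEMMAS AND PROOFS =====

theorem isIn_singleton (c : Char) (t : List Char) :
    PySem.Chars.isIn [c] t = true ↔ c ∈ t := by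
  rw [PySem.Chars.isIn_iff_infix]
  constructor
  · intro h; exact h.sublist.subset (List.mem_singleton_self c)
  · intro h
    obtain ⟨l, r, rfl⟩ := List.append_of_mem h
    exact ⟨l, r, by simp⟩

theorem replace_go_single (c : Char) :
    ∀ (fuel : Nat) (l acc : List Char), l.length ≤ fuel →
      PySem.Chars.replace.go [c] [] fuel l acc = acc.reverse ++ l.filter (fun x => x ≠ c) := by
  intro fuel
  induction fuel with
  | zero =>
    intro l acc hl
    have : l = [] := List.eq_nil_of_length_eq_zero (Nat.le_zero.mp hl)
    subst this
    rw [PySem.Chars.replace.go.eq_def]; simp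
  | succ fuel ih =>
    intro l acc hl
    cases l with
    | nil => rw [PySem.Chars.replace.go.eq_def]; simp
    | cons c' t =>
      rw [PySem.Chars.replace.go.eq_def]
      simp only [List.isPrefixOf, Bool.and_true]
      by_cases hc : c = c'
      · subst hc
        simp only [beq_self_eq_true, if_true, List.length_cons, List.length_nil,
          Nat.zero_add, List.drop_succ_cons, List.drop_zero, List.reverse_nil,
          List.nil_append]
        rw [ih t acc (by simpa using Nat.le_of_succ_le_succ hl)]
        simp
      · have hbeq : (c == c') = false := beq_eq_false_iff_ne.mpr hc
        rw [if_neg (by simp [hbeq])]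
        rw [ih t (c' :: acc) (by simpa using Nat.le_of_succ_le_succ hl)]
        simp [Ne.symm hc]

theorem replace_single_eq_filter (c : Char) (t : List Char) :
    PySem.Chars.replace t [c] [] = t.filter (fun x => x ≠ c) := by
  have h := replace_go_single c t.length t [] (le_refl _)
  simpa [PySem.Chars.replace] using h

theorem map_id_of_mem {α : Type} (f : α → α) (l : List α) (h : ∀ x ∈ l, f x = x) :
    l.map f = l := by
  induction l with
  | nil => rfl
  | cons a t ih => simp [h a (by simp), ih (fun x hx => h x (by simp [hx]))]

set_option maxRecDepth 10000 in
theorem lowerChar_idem_small :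
    ∀ n ∈ List.range 127,
      PySem.Chars.lowerChar (PySem.Chars.lowerChar (Char.ofNat n)) =
        PySem.Chars.lowerChar (Char.ofNat n) := by decide

theorem map_id_mem {α : Type} (f : α → α) : ∀ (l : List α), l.map f = l → ∀ x ∈ l, f x = x := by
  intro l
  induction l with
  | nil => intro _ x hx; cases hx
  | cons a t ih =>
    intro h x hx
    simp only [List.map_cons, List.cons.injEq] at h
    rcases List.mem_cons.mp hx with rfl | hx'
    · exact h.1
    · exact ih h.2 x hx'

theorem lowerChar_idem (c : Char) (hc : c.toNat ≤ 126) :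
    PySem.Chars.lowerChar (PySem.Chars.lowerChar c) = PySem.Chars.lowerChar c := by
  have := lowerChar_idem_small c.toNat (List.mem_range.mpr (by omega))
  rwa [Char.ofNat_toNat] at this

set_option maxRecDepth 10000 in
theorem lowerChar_upper_mem_small :
    ∀ n ∈ List.range 127,
      PySem.Chars.isupper (Char.ofNat n) = true →
        PySem.Chars.lowerChar (Char.ofNat n) ∈ pvRemove := by decide

theorem lowerChar_upper_mem (c : Char) (hc : c.toNat ≤ 126)
    (h : PySem.Chars.isupper c = true) :
    PySem.Chars.lowerChar c ∈ pvRemove := by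
  have := lowerChar_upper_mem_small c.toNat (List.mem_range.mpr (by omega))
  rw [Char.ofNat_toNat] at this
  exact this h

theorem lowerChar_of_not_upper (c : Char) (h : PySem.Chars.isupper c = false) :
    PySem.Chars.lowerChar c = c := by
  simp [PySem.Chars.lowerChar, h]

-- the state after a hit is lowercase-fixed
theorem lower_filter_lower (s : List Char) (hs : ∀ x ∈ s, x.toNat ≤ 126) (p : Char → Bool) :
    PySem.Chars.lower ((PySem.Chars.lower s).filter p) = (PySem.Chars.lower s).filter p := by
  apply map_id_of_mem
  intro x hx
  have hx' := List.mem_of_mem_filter hx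
  obtain ⟨y, hy, rfl⟩ := List.mem_map.mp hx'
  exact lowerChar_idem y (hs y hy)

theorem fold_fixed (cs : List Char) : ∀ s : List Char, PySem.Chars.lower s = s →
    cs.foldl (fun m c =>
      if PySem.Chars.isIn [c] (PySem.Chars.lower m) then
        PySem.Chars.replace (PySem.Chars.lower m) [c] []
      else m) s = s.filter (fun x => decide (x ∉ cs)) := by
  induction cs with
  | nil => intro s _; simp
  | cons c cs ih =>
    intro s hfix
    simp only [List.foldl_cons]
    by_cases hc : PySem.Chars.isIn [c] (PySem.Chars.lower s) = true
    · rw [if_pos hc, replace_single_eq_filter, hfix]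
      have hmap : s.map PySem.Chars.lowerChar = s := hfix
      have hall := map_id_mem PySem.Chars.lowerChar s hmap
      have hfix' : PySem.Chars.lower (List.filter (fun x => decide (x ≠ c)) s)
          = List.filter (fun x => decide (x ≠ c)) s :=
        map_id_of_mem _ _ (fun x hx => hall x (List.mem_of_mem_filter hx))
      rw [ih _ hfix', List.filter_filter]
      apply List.filter_congr
      intro x _
      simp [List.mem_cons, not_or, Bool.and_comm]
    · rw [if_neg hc, ih s hfix]
      apply List.filter_congr
      intro x hx
      have hxc : x ≠ c := by
        intro h; subst h
        exact hc ((isIn_singleton x _).mpr (by rw [hfix]; exact hx))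
      simp [List.mem_cons, hxc]

theorem fold_main (cs : List Char) (s : List Char) (hs : ∀ x ∈ s, x.toNat ≤ 126) :
    cs.foldl (fun m c =>
      if PySem.Chars.isIn [c] (PySem.Chars.lower m) then
        PySem.Chars.replace (PySem.Chars.lower m) [c] []
      else m) s =
    if ∃ c ∈ cs, c ∈ PySem.Chars.lower s then
      (PySem.Chars.lower s).filter (fun x => decide (x ∉ cs))
    else s := by
  induction cs with
  | nil => simp
  | cons c cs ih =>
    simp only [List.foldl_cons]
    by_cases hc : PySem.Chars.isIn [c] (PySem.Chars.lower s) = true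
    · have hcm : c ∈ PySem.Chars.lower s := (isIn_singleton c _).mp hc
      rw [if_pos hc, replace_single_eq_filter]
      rw [fold_fixed cs _ (lower_filter_lower s hs _), List.filter_filter]
      rw [if_pos ⟨c, by simp, hcm⟩]
      apply List.filter_congr
      intro x _
      simp [List.mem_cons, not_or, Bool.and_comm]
    · have hcm : c ∉ PySem.Chars.lower s := fun h => hc ((isIn_singleton c _).mpr h)
      rw [if_neg hc, ih]
      by_cases hex : ∃ c' ∈ cs, c' ∈ PySem.Chars.lower s
      · rw [if_pos hex, if_pos (by obtain ⟨c', h1, h2⟩ := hex; exact ⟨c', by simp [h1], h2⟩)]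
        apply List.filter_congr
        intro x hx
        have hxc : x ≠ c := fun h => hcm (h ▸ hx)
        simp [List.mem_cons, hxc]
      · rw [if_neg hex, if_neg]
        intro ⟨c', h1, h2⟩
        rcases List.mem_cons.mp h1 with rfl | h1'
        · exact hcm h2
        · exact hex ⟨c', h1', h2⟩

theorem nohit_eq (s : List Char) (hs : ∀ x ∈ s, x.toNat ≤ 126)
    (h : ∀ c ∈ pvRemove, c ∉ PySem.Chars.lower s) :
    (PySem.Chars.lower s).filter (fun x => decide (x ∉ pvRemove)) = s := by
  have hfixc : ∀ x ∈ s, PySem.Chars.lowerChar x = x := by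
    intro x hx
    cases hu : PySem.Chars.isupper x with
    | false => exact lowerChar_of_not_upper x hu
    | true =>
      exact absurd (List.mem_map_of_mem hx)
        (h _ (lowerChar_upper_mem x (hs x hx) hu))
  have hlow : PySem.Chars.lower s = s := map_id_of_mem _ s hfixc
  rw [hlow]
  apply List.filter_eq_self.mpr
  intro x hx
  simp only [decide_eq_true_eq]
  intro hxr
  exact h x hxr (by rw [hlow]; exact hx)

theorem contains_R (x : Char) :
    (!(PySem.Set.contains pvRemoveSet x)) = decide (x ∉ pvRemove) := by
  have hmem : x ∈ pvRemoveSet ↔ x ∈ pvRemove := by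
    unfold pvRemoveSet; exact PySem.Set.mem_ofList _ _
  by_cases hx : x ∈ pvRemove
  · have h1 : PySem.Set.contains pvRemoveSet x = true :=
      (PySem.Set.contains_iff _ _).mpr (hmem.mpr hx)
    rw [h1, Bool.not_true, decide_eq_false (not_not_intro hx)]
  · have h1 : PySem.Set.contains pvRemoveSet x = false := by
      rw [Bool.eq_false_iff]
      exact fun h => hx (hmem.mp ((PySem.Set.contains_iff _ _).mp h))
    rw [h1, Bool.not_false, decide_eq_true hx]

theorem pad_eq (s : List Char) :
    pvPadA s = if 15 ≤ s.length then s else List.replicate (15 - s.length) '0' ++ s := by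
  induction s using pvPadA.induct with
  | case1 s h =>
    rw [pvPadA, if_pos h, if_pos (by omega)]
  | case2 s h1 h2 ih =>
    rw [pvPadA, if_neg h1, if_pos h2, ih, if_neg (by omega : ¬ 15 ≤ s.length)]
    by_cases h14 : s.length = 14
    · rw [if_pos (by simp [h14])]
      simp [h14]
    · rw [if_neg (by simp only [List.length_cons]; omega)]
      have h3 : 15 - ('0' :: s).length = 14 - s.length := by
        simp only [List.length_cons]; omega
      rw [h3]
      have h4 : 15 - s.length = (14 - s.length) + 1 := by omega
      rw [h4, List.replicate_succ']
      simp
  | case3 s h1 h2 =>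
    rw [pvPadA, if_neg h1, if_neg h2, if_pos (by omega)]

theorem string_of_pad (m : List Char) :
    String.ofList (pvPadA m) =
      (if 15 ≤ m.length then String.ofList m
       else String.ofList (List.replicate (15 - m.length) '0' ++ m)) := by
  rw [pad_eq]
  by_cases h : 15 ≤ m.length <;> simp [h]

-- ===== VERDICT (by name: the statement is the Claim_ definition above) =====
theorem microchip_cleaner_spec : Claim_equal_microchip_cleaner := by
  intro mchip hdom
  unfold Spec_microchip_cleaner microchip_cleaner microchip_cleaner_alt
  have hs : ∀ x ∈ mchip.toList, x.toNat ≤ 126 := by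
    intro x hx
    have := List.all_eq_true.mp hdom x hx
    simp only [pvDomChar, Bool.or_eq_true, Bool.and_eq_true, decide_eq_true_eq, beq_iff_eq] at this
    omega
  have hf : (fun c => !(PySem.Set.contains pvRemoveSet c)) = (fun x => decide (x ∉ pvRemove)) :=
    funext contains_R
  simp only [hf]
  rw [fold_main pvRemove mchip.toList hs]
  by_cases hhit : ∃ c ∈ pvRemove, c ∈ PySem.Chars.lower mchip.toList
  · rw [if_pos hhit, string_of_pad]
  · rw [if_neg hhit, string_of_pad]
    have hhit' : ∀ c ∈ pvRemove, c ∉ PySem.Chars.lower mchip.toList :=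
      fun c h1 h2 => hhit ⟨c, h1, h2⟩
    rw [nohit_eq mchip.toList hs hhit']
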